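-- pv_equiv track=rewrite | github.com/wangyj124/PageIndex | pageindex/markdown.py | resolve_fallback_physical_indices
-- ===== SOURCE A (Python) =====
-- def resolve_fallback_physical_indices(flat_toc_items, default_page=1):
--     resolved_items = [dict(item) for item in flat_toc_items]
--
--     for item in resolved_items:
--         item["resolved_physical_index"] = item["physical_index"]
--
--     index = 0
--     while index < len(resolved_items):
--         if resolved_items[index]["resolved_physical_index"] is not None:
--             index += 1
--             continue
--
--         start = index
--         while index < len(resolved_items) and resolved_items[index]["resolved_physical_index"] is None:
--             index += 1
--         end = index - 1
--
--         previous_page = None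
--         for previous_index in range(start - 1, -1, -1):
--             candidate = resolved_items[previous_index]["resolved_physical_index"]
--             if candidate is not None:
--                 previous_page = candidate
--                 break
--
--         next_page = None
--         for next_index in range(index, len(resolved_items)):
--             candidate = resolved_items[next_index]["resolved_physical_index"]
--             if candidate is not None:
--                 next_page = candidate
--                 break
--
--         missing_count = end - start + 1
--         if previous_page is None and next_page is None:
--             inferred_pages = [default_page] * missing_count
--         elif previous_page is None:
--             inferred_pages = [next_page] * missing_count
--         elif next_page is None:
--             inferred_pages = [previous_page] * missing_count
--         else:
--             gap = max(next_page - previous_page, 0)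
--             if gap == 0:
--                 inferred_pages = [previous_page] * missing_count
--             else:
--                 inferred_pages = [
--                     previous_page + ((gap * (offset + 1)) // (missing_count + 1))
--                     for offset in range(missing_count)
--                 ]
--
--         for offset, inferred_page in enumerate(inferred_pages):
--             resolved_items[start + offset]["resolved_physical_index"] = inferred_page
--
--     return resolved_items
-- ===== SOURCE B (Python) =====
-- def resolve_fallback_physical_indices(flat_toc_items, default_page=1):
--     def infer(prev, count, nxt):
--         if prev is None and nxt is None:
--             return [default_page] * count
--         if prev is None:
--             return [nxt] * count
--         if nxt is None:
--             return [prev] * count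
--         gap = max(nxt - prev, 0)
--         return [prev + gap * (k + 1) // (count + 1) for k in range(count)]
--
--     def go(prev, values):
--         run = 0
--         while run < len(values) and values[run] is None:
--             run += 1
--         nxt = values[run] if run < len(values) else None
--         if nxt is None:
--             return infer(prev, run, None)
--         return infer(prev, run, nxt) + [nxt] + go(nxt, values[run + 1:])
--
--     values = [item["physical_index"] for item in flat_toc_items]
--     resolved = go(None, values)
--     out = []
--     for item, page in zip(flat_toc_items, resolved):
--         new_item = dict(item)
--         new_item["resolved_physical_index"] = page
--         out.append(new_item)
--     return out
-- ===== Notes on version B (the rewrite author's own statement) =====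
-- stated objective: simpler
-- what changed: Replaces A's imperative index-driven while loop with in-place writes and backward/forward anchor scans by a pure recursion that splits the value sequence into leading None-runs followed by an anchor, builds the resolved page list functionally by concatenation, and zips it back onto copies of the items.
import Mathlib
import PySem

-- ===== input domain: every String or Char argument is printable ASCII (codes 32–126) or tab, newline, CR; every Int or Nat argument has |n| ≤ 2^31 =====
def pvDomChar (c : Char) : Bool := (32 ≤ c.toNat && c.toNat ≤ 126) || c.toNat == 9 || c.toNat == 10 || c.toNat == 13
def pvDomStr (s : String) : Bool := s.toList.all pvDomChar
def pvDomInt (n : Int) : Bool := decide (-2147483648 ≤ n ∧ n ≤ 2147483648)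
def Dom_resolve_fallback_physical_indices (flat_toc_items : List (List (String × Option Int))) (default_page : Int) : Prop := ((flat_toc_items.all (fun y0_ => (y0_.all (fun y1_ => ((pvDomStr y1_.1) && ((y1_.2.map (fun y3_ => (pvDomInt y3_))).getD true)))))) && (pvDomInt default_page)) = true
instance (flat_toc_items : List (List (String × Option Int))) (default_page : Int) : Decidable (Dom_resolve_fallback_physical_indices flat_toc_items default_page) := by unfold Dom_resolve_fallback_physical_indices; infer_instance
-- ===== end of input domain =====

-- B replaces A's index-driven while loop with in-place writes by a pure recursion over
-- None-runs that builds the resolved page list by concatenation (objective: simpler).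
-- Python's A mutates only its own dict copies, so the return value is the whole behaviour.

-- ===== PORT A =====
-- shared dict primitives: item[k] read and item[k] = v write on an association-list dict
def pvVal (it : List (String × Option Int)) : Option Int :=
  (PySem.Dict.mk it).getD "resolved_physical_index" none
def pvIns (it : List (String × Option Int)) (v : Option Int) : List (String × Option Int) :=
  ((PySem.Dict.mk it).insert "resolved_physical_index" v).items

-- inner while: advance index past the run of items whose resolved_physical_index is None
def pvScanNone (cur : List (List (String × Option Int))) (i : Nat) : Nat :=
  if h : i < cur.length ∧ (pvVal (cur.getD i [])).isNone then pvScanNone cur (i + 1) else i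
termination_by cur.length - i
decreasing_by exact Nat.sub_succ_lt_self _ _ h.1

theorem pvScanNone_ge (cur : List (List (String × Option Int))) (i : Nat) : i ≤ pvScanNone cur i := by
  rw [pvScanNone]
  split
  · exact Nat.le_trans (Nat.le_succ i) (pvScanNone_ge cur (i + 1))
  · exact Nat.le_refl i
termination_by cur.length - i
decreasing_by rename_i h; exact Nat.sub_succ_lt_self _ _ h.1

theorem pvScanNone_gt (cur : List (List (String × Option Int))) (i : Nat)
    (h1 : i < cur.length) (h2 : (pvVal (cur.getD i [])).isNone) : i < pvScanNone cur i := by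
  rw [pvScanNone, dif_pos ⟨h1, h2⟩]
  exact Nat.lt_of_lt_of_le (Nat.lt_succ_self i) (pvScanNone_ge cur (i + 1))

-- backward for-loop: range(start-1, -1, -1) looking for the first non-None candidate
def pvPrevScan (cur : List (List (String × Option Int))) : Nat → Option Int
  | 0 => none
  | n + 1 => if (pvVal (cur.getD n [])).isSome then pvVal (cur.getD n []) else pvPrevScan cur n

-- forward for-loop: range(index, len) looking for the first non-None candidate
def pvNextScan (cur : List (List (String × Option Int))) (i : Nat) : Option Int :=
  if h : i < cur.length then
    if (pvVal (cur.getD i [])).isSome then pvVal (cur.getD i []) else pvNextScan cur (i + 1)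
  else none
termination_by cur.length - i
decreasing_by exact Nat.sub_succ_lt_self _ _ h

-- the four-way branch building inferred_pages (missing_count = m)
def pvInferredA (pp np : Option Int) (m : Nat) (d : Int) : List Int :=
  match pp, np with
  | none, none => List.replicate m d
  | none, some v => List.replicate m v
  | some v, none => List.replicate m v
  | some pv, some nv =>
    let gap : Int := max (nv - pv) 0
    if gap = 0 then List.replicate m pv
    else (List.range m).map (fun (off : Nat) => pv + PySem.Int.floordiv (gap * ((off : Int) + 1)) ((m : Int) + 1))

-- for offset, inferred_page in enumerate(inferred_pages): write at start+offset
def pvWriteA (cur : List (List (String × Option Int))) (pos : Nat) :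
    List Int → List (List (String × Option Int))
  | [] => cur
  | pg :: rest => pvWriteA (cur.modify pos (fun it => pvIns it (some pg))) (pos + 1) rest

theorem pvWriteA_length (pages : List Int) : ∀ (cur : List (List (String × Option Int))) (pos : Nat),
    (pvWriteA cur pos pages).length = cur.length := by
  induction pages with
  | nil => intro cur pos; rfl
  | cons pg rest ih => intro cur pos; rw [pvWriteA, ih, List.length_modify]

-- the outer while loop of A
def pvALoop (cur : List (List (String × Option Int))) (index : Nat) (d : Int) :
    List (List (String × Option Int)) :=
  if h : index < cur.length then
    if hs : (pvVal (cur.getD index [])).isSome then pvALoop cur (index + 1) d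
    else
      let j := pvScanNone cur index
      let pp := pvPrevScan cur index
      let np := pvNextScan cur j
      let pages := pvInferredA pp np (j - index) d
      pvALoop (pvWriteA cur index pages) j d
  else cur
termination_by cur.length - index
decreasing_by
  · exact Nat.sub_succ_lt_self _ _ h
  · rw [pvWriteA_length]
    exact Nat.sub_lt_sub_left h
      (pvScanNone_gt cur index h (Option.isNone_iff_eq_none.mpr (Option.not_isSome_iff_eq_none.mp hs)))

-- A: copy each dict, set resolved_physical_index = physical_index, then run the loop.
-- item["physical_index"] is read with getD _ none: exact under Pre_ (the key is present;
-- Python raises KeyError outside Pre_).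
def resolve_fallback_physical_indices (flat_toc_items : List (List (String × Option Int))) (default_page : Int) : List (List (String × Option Int)) :=
  pvALoop (flat_toc_items.map (fun it => pvIns it ((PySem.Dict.mk it).getD "physical_index" none))) 0 default_page

-- ===== PORT B =====
-- infer(prev, count, nxt): pages for a None-run of length count between the given anchors
def pvInferB (prev : Option Int) (count : Nat) (nxt : Option Int) (d : Int) : List Int :=
  match prev, nxt with
  | none, none => List.replicate count d
  | none, some v => List.replicate count v
  | some v, none => List.replicate count v
  | some pv, some nv =>
    let gap : Int := max (nv - pv) 0
    (List.range count).map (fun (k : Nat) => pv + PySem.Int.floordiv (gap * ((k : Int) + 1)) ((count : Int) + 1))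

-- run = length of the leading None-run of values
def pvRunLen : List (Option Int) → Nat
  | none :: t => pvRunLen t + 1
  | _ => 0

-- go(prev, values): split off the leading None-run and its following anchor, recurse
def pvGo (prev : Option Int) (values : List (Option Int)) (d : Int) : List Int :=
  let run := pvRunLen values
  match hx : values.getD run none with
  | none => pvInferB prev run none d
  | some v => pvInferB prev run (some v) d ++ v :: pvGo (some v) (values.drop (run + 1)) d
termination_by values.length
decreasing_by
  rw [List.length_drop]
  refine Nat.sub_lt ?_ (Nat.succ_pos _)
  cases values with
  | nil => exact absurd hx (fun h => nomatch h)
  | cons a t => exact Nat.succ_pos t.length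

def resolve_fallback_physical_indices_alt (flat_toc_items : List (List (String × Option Int))) (default_page : Int) : List (List (String × Option Int)) :=
  let values := flat_toc_items.map (fun it => (PySem.Dict.mk it).getD "physical_index" none)
  let resolved := pvGo none values default_page
  (flat_toc_items.zip resolved).map (fun p => pvIns p.1 (some p.2))

-- ===== PRECONDITION & SPEC =====
-- Pre_ excludes exactly the inputs where some item lacks the key "physical_index",
-- on which the Python A raises KeyError (and returns nothing).
def Pre_resolve_fallback_physical_indices (flat_toc_items : List (List (String × Option Int))) (default_page : Int) : Prop :=
  ∀ it ∈ flat_toc_items, ((PySem.Dict.mk it).get? "physical_index").isSome = true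
instance (flat_toc_items : List (List (String × Option Int))) (default_page : Int) : Decidable (Pre_resolve_fallback_physical_indices flat_toc_items default_page) := by unfold Pre_resolve_fallback_physical_indices; infer_instance

def pvWitness_resolve_fallback_physical_indices : (List (List (String × Option Int))) × Int :=
  ([[("physical_index", some 3)], [("physical_index", none)], [("physical_index", some 9)]], 1)

def Spec_resolve_fallback_physical_indices (flat_toc_items : List (List (String × Option Int))) (default_page : Int) (out : List (List (String × Option Int))) : Prop := out = resolve_fallback_physical_indices_alt flat_toc_items default_page
instance (flat_toc_items : List (List (String × Option Int))) (default_page : Int) (out : List (List (String × Option Int))) : Decidable (Spec_resolve_fallback_physical_indices flat_toc_items default_page out) := by unfold Spec_resolve_fallback_physical_indices; infer_instance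

-- ===== CLAIM (what is proved, stated in full; the proofs are below) =====
def Claim_equal_resolve_fallback_physical_indices : Prop := ∀ (flat_toc_items : List (List (String × Option Int))) (default_page : Int), Dom_resolve_fallback_physical_indices flat_toc_items default_page → Pre_resolve_fallback_physical_indices flat_toc_items default_page → Spec_resolve_fallback_physical_indices flat_toc_items default_page (resolve_fallback_physical_indices flat_toc_items default_page)

-- ===== LEMMAS AND PROOFS =====

theorem pvVal_pvIns (it : List (String × Option Int)) (v : Option Int) : pvVal (pvIns it v) = v := by
  have h : PySem.Dict.mk (((PySem.Dict.mk it).insert "resolved_physical_index" v).items)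
      = (PySem.Dict.mk it).insert "resolved_physical_index" v := rfl
  simp only [pvVal, pvIns, h]
  exact PySem.Dict.getD_insert_self _ _ _ _

theorem pvIns_pvIns (it : List (String × Option Int)) (v w : Option Int) :
    pvIns (pvIns it v) w = pvIns it w := by
  have h : PySem.Dict.mk (((PySem.Dict.mk it).insert "resolved_physical_index" v).items)
      = (PySem.Dict.mk it).insert "resolved_physical_index" v := rfl
  simp only [pvIns, h, PySem.Dict.insert_insert_self]

-- the simulation state: items zipped with their current resolved values
def pvZm (flat : List (List (String × Option Int))) (ws : List (Option Int)) :
    List (List (String × Option Int)) :=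
  (flat.zip ws).map (fun p => pvIns p.1 p.2)

theorem pvZm_length (flat : List (List (String × Option Int))) (ws : List (Option Int))
    (h : ws.length = flat.length) : (pvZm flat ws).length = ws.length := by
  simp [pvZm]; omega

theorem pvVal_nil : pvVal [] = none := rfl

theorem pvVal_pvZm (flat : List (List (String × Option Int))) (ws : List (Option Int))
    (h : ws.length = flat.length) (k : Nat) :
    pvVal ((pvZm flat ws).getD k []) = ws.getD k none := by
  by_cases hk : k < ws.length
  · have hkz : k < (pvZm flat ws).length := by rw [pvZm_length flat ws h]; exact hk
    rw [List.getD_eq_getElem _ _ hkz, List.getD_eq_getElem _ _ hk]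
    simp only [pvZm, List.getElem_map, List.getElem_zip]
    exact pvVal_pvIns _ _
  · rw [List.getD_eq_default _ _ (by rw [pvZm_length flat ws h]; omega),
        List.getD_eq_default _ _ (by omega)]
    exact pvVal_nil

-- value-level mirror of pvWriteA
def pvVWrite (ws : List (Option Int)) (pos : Nat) : List Int → List (Option Int)
  | [] => ws
  | pg :: rest => pvVWrite (ws.set pos (some pg)) (pos + 1) rest

theorem pvVWrite_length (pages : List Int) : ∀ (ws : List (Option Int)) (pos : Nat),
    (pvVWrite ws pos pages).length = ws.length := by
  induction pages with
  | nil => intro ws pos; rfl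
  | cons pg rest ih => intro ws pos; rw [pvVWrite, ih]; exact List.length_set

theorem pvGetD_set (ws : List (Option Int)) (pos k : Nat) (v : Option Int) :
    (ws.set pos v).getD k none = if pos = k ∧ pos < ws.length then v else ws.getD k none := by
  simp only [List.getD_eq_getElem?_getD, List.getElem?_set]
  split_ifs with h1 h2 h3 h4 <;> simp_all <;> omega

theorem pvVWrite_getD (pages : List Int) : ∀ (ws : List (Option Int)) (pos k : Nat),
    (pvVWrite ws pos pages).getD k none =
      if pos ≤ k ∧ k < pos + pages.length ∧ k < ws.length then some (pages.getD (k - pos) 0)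
      else ws.getD k none := by
  induction pages with
  | nil => intro ws pos k; rw [pvVWrite, if_neg (by rintro ⟨h1, h2, h3⟩; simp at h2; omega)]
  | cons pg rest ih =>
    intro ws pos k
    rw [pvVWrite, ih, pvGetD_set, List.length_set]
    by_cases h1 : pos + 1 ≤ k ∧ k < pos + 1 + rest.length ∧ k < ws.length
    · rw [if_pos h1, if_pos (by simp; omega)]
      have : k - pos = (k - (pos + 1)) + 1 := by omega
      rw [this, List.getD_cons_succ]
    · rw [if_neg h1]
      by_cases h2 : pos = k ∧ pos < ws.length
      · rw [if_pos h2, if_pos (by simp; omega)]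
        have : k - pos = 0 := by omega
        rw [this]; rfl
      · rw [if_neg h2, if_neg (by simp; omega)]

theorem pvZm_modify (flat : List (List (String × Option Int))) (ws : List (Option Int))
    (h : ws.length = flat.length) (pos : Nat) (v : Option Int) :
    (pvZm flat ws).modify pos (fun it => pvIns it v) = pvZm flat (ws.set pos v) := by
  apply List.ext_getElem
  · rw [List.length_modify, pvZm_length flat ws h,
        pvZm_length flat _ (by rw [List.length_set]; exact h), List.length_set]
  · intro i h1 h2
    rw [List.getElem_modify]
    have hi : i < ws.length := by rw [List.length_modify, pvZm_length flat ws h] at h1; exact h1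
    simp only [pvZm, List.getElem_map, List.getElem_zip, List.getElem_set]
    split_ifs with hpi
    · subst hpi; exact pvIns_pvIns _ _ _
    · rfl

theorem pvWriteA_pvZm (pages : List Int) : ∀ (flat : List (List (String × Option Int)))
    (ws : List (Option Int)) (pos : Nat), ws.length = flat.length →
    pvWriteA (pvZm flat ws) pos pages = pvZm flat (pvVWrite ws pos pages) := by
  induction pages with
  | nil => intro flat ws pos h; rfl
  | cons pg rest ih =>
    intro flat ws pos h
    rw [pvWriteA, pvVWrite, pvZm_modify flat ws h]
    exact ih flat _ (pos + 1) (by rw [List.length_set]; exact h)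

theorem pvScanNone_spec (cur : List (List (String × Option Int))) (i : Nat) (h : i ≤ cur.length) :
    pvScanNone cur i ≤ cur.length ∧
    (∀ k, i ≤ k → k < pvScanNone cur i → pvVal (cur.getD k []) = none) ∧
    (pvScanNone cur i < cur.length → (pvVal (cur.getD (pvScanNone cur i) [])).isSome) := by
  rw [pvScanNone]
  split
  · next hc =>
    obtain ⟨hrec1, hrec2, hrec3⟩ := pvScanNone_spec cur (i + 1) (by omega)
    refine ⟨hrec1, ?_, hrec3⟩
    intro k hk1 hk2
    rcases Nat.lt_or_ge k (i + 1) with hlt | hge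
    · have : k = i := by omega
      subst this
      exact Option.isNone_iff_eq_none.mp hc.2
    · exact hrec2 k hge hk2
  · next hc =>
    refine ⟨h, by omega, ?_⟩
    intro hlt
    cases hv : pvVal (cur.getD i []) with
    | none => exact absurd ⟨hlt, by rw [hv]; rfl⟩ hc
    | some v => simp
termination_by cur.length - i
decreasing_by omega

theorem pvRunLen_eq_of (l : List (Option Int)) : ∀ (r : Nat), r ≤ l.length →
    (∀ k, k < r → l.getD k none = none) →
    (r < l.length → (l.getD r none).isSome) → pvRunLen l = r := by
  induction l with
  | nil =>
    intro r h1 _ _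
    have hr : r = 0 := Nat.le_zero.mp (by simpa using h1)
    subst hr; rfl
  | cons x t ih =>
    intro r h1 h2 h3
    match r with
    | 0 =>
      have := h3 (by simp)
      match x with
      | some v => rfl
      | none => simp at this
    | r' + 1 =>
      have hx : x = none := h2 0 (by omega)
      subst hx
      show pvRunLen t + 1 = r' + 1
      rw [ih r' (by simp only [List.length_cons] at h1; omega)
        (fun k hk => by have := h2 (k + 1) (by omega); rwa [List.getD_cons_succ] at this)
        (fun hlt => by
          have := h3 (by simp only [List.length_cons]; omega)
          rwa [List.getD_cons_succ] at this)]

theorem pvGetD_drop (l : List (Option Int)) (i k : Nat) :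
    (l.drop i).getD k none = l.getD (i + k) none := by
  simp [List.getD_eq_getElem?_getD, List.getElem?_drop]

theorem pvInferredA_eq (pp np : Option Int) (m : Nat) (d : Int) :
    pvInferredA pp np m d = pvInferB pp m np d := by
  cases pp with
  | none => cases np <;> rfl
  | some pv =>
    cases np with
    | none => rfl
    | some nv =>
      simp only [pvInferredA, pvInferB]
      split_ifs with hg
      · rw [hg]
        have hz : ∀ k : Nat, pv + PySem.Int.floordiv ((0 : Int) * ((k : Int) + 1)) ((m : Int) + 1) = pv := by
          intro k
          rw [zero_mul, PySem.Int.floordiv_eq_ediv_of_pos (by positivity), Int.zero_ediv, add_zero]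
        symm
        calc (List.range m).map (fun (k : Nat) => pv + PySem.Int.floordiv ((0 : Int) * ((k : Int) + 1)) ((m : Int) + 1))
            = (List.range m).map (fun (_ : Nat) => pv) := List.map_congr_left (fun a _ => hz a)
          _ = List.replicate m pv := by rw [List.map_const', List.length_range]
      · rfl

theorem pvInferB_length (prev : Option Int) (count : Nat) (nxt : Option Int) (d : Int) :
    (pvInferB prev count nxt d).length = count := by
  cases prev <;> cases nxt <;> simp [pvInferB]

theorem pvInferB_zero (prev nxt : Option Int) (d : Int) : pvInferB prev 0 nxt d = [] := by
  cases prev <;> cases nxt <;> rfl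

theorem pvGo_nil (prev : Option Int) (d : Int) : pvGo prev [] d = [] := by
  rw [pvGo]
  exact pvInferB_zero _ _ _

theorem pvGo_eq_none_case (prev : Option Int) (d : Int) (l : List (Option Int)) (r : Nat)
    (hr : pvRunLen l = r) (hnone : l.getD r none = none) :
    pvGo prev l d = pvInferB prev r none d := by
  rw [pvGo]
  split
  · rw [hr]
  · next v hx =>
    rw [hr, hnone] at hx
    cases hx

theorem pvGo_eq_some_case (prev : Option Int) (d : Int) (l : List (Option Int)) (r : Nat) (v : Int)
    (hr : pvRunLen l = r) (hsome : l.getD r none = some v) :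
    pvGo prev l d = pvInferB prev r (some v) d ++ v :: pvGo (some v) (l.drop (r + 1)) d := by
  rw [pvGo]
  split
  · next hx =>
    rw [hr, hsome] at hx
    cases hx
  · next v' hx =>
    rw [hr, hsome] at hx
    cases hx
    rw [hr]

theorem pvGo_cons_some (v : Int) (t : List (Option Int)) (prev : Option Int) (d : Int) :
    pvGo prev (some v :: t) d = v :: pvGo (some v) t d := by
  rw [pvGo_eq_some_case prev d _ 0 v rfl rfl, pvInferB_zero]
  rfl

theorem pvVWrite_take (ws : List (Option Int)) (idx : Nat) (pages : List Int) (j : Nat)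
    (hij : idx ≤ j) (hplen : pages.length = j - idx) (hjle : j ≤ ws.length) :
    (pvVWrite ws idx pages).take j = ws.take idx ++ pages.map some := by
  apply List.ext_getElem
  · rw [List.length_take, List.length_append, List.length_take, List.length_map,
      hplen, pvVWrite_length]
    omega
  · intro i hi1 hi2
    have hiw : i < (pvVWrite ws idx pages).length := by
      rw [List.length_take] at hi1; rw [pvVWrite_length]; rw [pvVWrite_length] at hi1; omega
    have hij2 : i < j := by rw [List.length_take, pvVWrite_length] at hi1; omega
    rw [List.getElem_take, ← List.getD_eq_getElem _ none hiw, pvVWrite_getD]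
    rcases Nat.lt_or_ge i idx with hi3 | hi3
    · rw [if_neg (by omega)]
      rw [List.getElem_append_left (by rw [List.length_take]; omega)]
      rw [List.getElem_take]
      exact List.getD_eq_getElem ws none (by omega)
    · rw [if_pos ⟨hi3, by rw [hplen]; omega, by omega⟩]
      rw [List.getElem_append_right (by rw [List.length_take]; omega)]
      rw [List.getElem_map]
      have hlen : (ws.take idx).length = idx := by rw [List.length_take]; omega
      simp only [hlen]
      rw [List.getD_eq_getElem pages 0 (by rw [hplen]; omega)]

theorem pvExit (flat : List (List (String × Option Int))) (d : Int) (ws : List (Option Int))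
    (idx : Nat) (prev : Option Int) (hf : ws.length = flat.length) (hlen : ws.length ≤ idx)
    (h1 : ws.length = (flat.map (fun it => (PySem.Dict.mk it).getD "physical_index" none)).length) :
    pvALoop (pvZm flat ws) idx d =
      pvZm flat (ws.take idx ++ (pvGo prev ((flat.map (fun it => (PySem.Dict.mk it).getD "physical_index" none)).drop idx) d).map some) := by
  rw [pvALoop, dif_neg (by rw [pvZm_length flat ws hf]; omega)]
  rw [List.take_of_length_le hlen, List.drop_of_length_le (by omega), pvGo_nil,
    List.map_nil, List.append_nil]

-- main simulation: A's loop from a mid-state equals the untouched prefix plus B's go on the rest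
theorem pvMain (flat : List (List (String × Option Int))) (d : Int) :
    ∀ (N : Nat) (ws : List (Option Int)) (idx : Nat) (prev : Option Int),
    (flat.map (fun it => (PySem.Dict.mk it).getD "physical_index" none)).length - idx ≤ N →
    ws.length = (flat.map (fun it => (PySem.Dict.mk it).getD "physical_index" none)).length →
    (∀ k, idx ≤ k → ws.getD k none = (flat.map (fun it => (PySem.Dict.mk it).getD "physical_index" none)).getD k none) →
    (∀ k, k < idx → (ws.getD k none).isSome) →
    (idx < ws.length → ws.getD idx none = none → pvPrevScan (pvZm flat ws) idx = prev) →
    pvALoop (pvZm flat ws) idx d =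
      pvZm flat (ws.take idx ++ (pvGo prev ((flat.map (fun it => (PySem.Dict.mk it).getD "physical_index" none)).drop idx) d).map some) := by
  intro N
  induction N with
  | zero =>
    intro ws idx prev hN h1 h2 h3 h4
    exact pvExit flat d ws idx prev (by rw [h1, List.length_map]) (by omega) h1
  | succ N ih =>
    intro ws idx prev hN h1 h2 h3 h4
    have hf : ws.length = flat.length := by rw [h1, List.length_map]
    set vs := flat.map (fun it => (PySem.Dict.mk it).getD "physical_index" none) with hvsdef
    by_cases hidx : idx < ws.length
    · have hzl : (pvZm flat ws).length = ws.length := pvZm_length flat ws hf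
      have hval : ∀ k, pvVal ((pvZm flat ws).getD k []) = ws.getD k none := pvVal_pvZm flat ws hf
      rw [pvALoop, dif_pos (by rw [hzl]; exact hidx)]
      by_cases hs : (ws.getD idx none).isSome
      · rw [dif_pos (by rw [hval]; exact hs)]
        obtain ⟨v, hv⟩ := Option.isSome_iff_exists.mp hs
        have hvs : vs.getD idx none = some v := by rw [← h2 idx (le_refl idx)]; exact hv
        have hstep := ih ws (idx + 1) (some v) (by omega) h1 (fun k hk => h2 k (by omega))
          (fun k hk => by
            rcases Nat.lt_or_ge k idx with hk2 | hk2
            · exact h3 k hk2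
            · have hkeq : k = idx := by omega
              rw [hkeq, hv]; rfl)
          (fun _ _ => by
            rw [pvPrevScan, hval idx, hv]
            simp)
        rw [hstep]
        congr 1
        have hvidx : idx < vs.length := by omega
        have hgetElem : vs[idx] = some v := by rw [← List.getD_eq_getElem vs none hvidx]; exact hvs
        have hdrop : vs.drop idx = some v :: vs.drop (idx + 1) := by
          rw [List.drop_eq_getElem_cons hvidx, hgetElem]
        rw [hdrop, pvGo_cons_some]
        have hwidx : ws[idx] = some v := by rw [← List.getD_eq_getElem ws none hidx]; exact hv
        have htake : ws.take (idx + 1) = ws.take idx ++ [some v] := by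
          rw [List.take_succ, List.getElem?_eq_getElem hidx, hwidx]
          rfl
        rw [htake, List.map_cons, List.append_assoc]
        rfl
      · rw [dif_neg (by rw [hval]; exact hs)]
        have hnone : ws.getD idx none = none := Option.not_isSome_iff_eq_none.mp hs
        have hjgt : idx < pvScanNone (pvZm flat ws) idx :=
          pvScanNone_gt _ _ (by rw [hzl]; exact hidx) (by rw [hval, hnone]; rfl)
        obtain ⟨hjle0, hmid0, hjsome0⟩ := pvScanNone_spec (pvZm flat ws) idx (by rw [hzl]; omega)
        set j := pvScanNone (pvZm flat ws) idx with hjdef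
        have hjle : j ≤ ws.length := by rw [hzl] at hjle0; exact hjle0
        have hvsmid : ∀ k, idx ≤ k → k < j → vs.getD k none = none := fun k hk1 hk2 => by
          rw [← h2 k hk1, ← hval k]; exact hmid0 k hk1 hk2
        have hrun : pvRunLen (vs.drop idx) = j - idx := by
          apply pvRunLen_eq_of
          · rw [List.length_drop]; omega
          · intro k hk; rw [pvGetD_drop]; exact hvsmid (idx + k) (by omega) (by omega)
          · intro hlt
            rw [List.length_drop] at hlt
            have hjlt : j < ws.length := by omega
            rw [pvGetD_drop, show idx + (j - idx) = j from by omega, ← h2 j (by omega), ← hval j]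
            exact hjsome0 (by rw [hzl]; exact hjlt)
        have hpp : pvPrevScan (pvZm flat ws) idx = prev := h4 hidx hnone
        rcases Nat.lt_or_ge j ws.length with hjlt | hjge
        · -- interior gap: an anchor exists at position j
          have hjs : (ws.getD j none).isSome := by
            rw [← hval j]; exact hjsome0 (by rw [hzl]; exact hjlt)
          obtain ⟨w, hw⟩ := Option.isSome_iff_exists.mp hjs
          have hwv : vs.getD j none = some w := by rw [← h2 j (by omega)]; exact hw
          have hnp : pvNextScan (pvZm flat ws) j = some w := by
            rw [pvNextScan, dif_pos (by rw [hzl]; exact hjlt),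
              if_pos (by rw [hval]; exact hjs), hval]
            exact hw
          show pvALoop (pvWriteA (pvZm flat ws) idx (pvInferredA (pvPrevScan (pvZm flat ws) idx)
              (pvNextScan (pvZm flat ws) j) (j - idx) d)) j d = _
          rw [hpp, hnp]
          set pages := pvInferredA prev (some w) (j - idx) d with hpagesdef
          have hplen : pages.length = j - idx := by rw [hpagesdef, pvInferredA_eq, pvInferB_length]
          rw [pvWriteA_pvZm pages flat ws idx hf]
          set ws' := pvVWrite ws idx pages with hws'def
          have hw'len : ws'.length = ws.length := pvVWrite_length pages ws idx
          have hstep := ih ws' j none (by omega) (by rw [hw'len]; exact h1)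
            (fun k hk => by
              rw [hws'def, pvVWrite_getD, if_neg (by rw [hplen]; omega)]
              exact h2 k (by omega))
            (fun k hk => by
              rcases Nat.lt_or_ge k idx with hk2 | hk2
              · rw [hws'def, pvVWrite_getD, if_neg (by omega)]; exact h3 k hk2
              · rw [hws'def, pvVWrite_getD,
                  if_pos ⟨hk2, by rw [hplen]; omega, by omega⟩]; rfl)
            (fun hlt hn => by
              rw [hws'def, pvVWrite_getD, if_neg (by rw [hplen]; omega), hw] at hn
              cases hn)
          rw [hstep]
          congr 1
          have hjvs : j < vs.length := by omega
          have hgetj : vs[j] = some w := by rw [← List.getD_eq_getElem vs none hjvs]; exact hwv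
          have hdropj : vs.drop j = some w :: vs.drop (j + 1) := by
            rw [List.drop_eq_getElem_cons hjvs, hgetj]
          have hgo1 : pvGo prev (vs.drop idx) d =
              pvInferB prev (j - idx) (some w) d ++ w :: pvGo (some w) ((vs.drop idx).drop (j - idx + 1)) d :=
            pvGo_eq_some_case prev d _ _ w hrun
              (by rw [pvGetD_drop, show idx + (j - idx) = j from by omega]; exact hwv)
          have hdd : (vs.drop idx).drop (j - idx + 1) = vs.drop (j + 1) := by
            rw [List.drop_drop]; congr 1; omega
          rw [hdd] at hgo1
          have hgo2 : pvGo none (vs.drop j) d = w :: pvGo (some w) (vs.drop (j + 1)) d := by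
            rw [hdropj, pvGo_cons_some]
          have htake : ws'.take j = ws.take idx ++ pages.map some :=
            pvVWrite_take ws idx pages j (by omega) hplen hjle
          rw [hgo1, hgo2, htake, hpagesdef, pvInferredA_eq]
          simp [List.append_assoc]
        · -- the None-run reaches the end of the list
          have hjeq : j = ws.length := by omega
          have hnp : pvNextScan (pvZm flat ws) j = none := by
            rw [pvNextScan, dif_neg (by rw [hzl]; omega)]
          show pvALoop (pvWriteA (pvZm flat ws) idx (pvInferredA (pvPrevScan (pvZm flat ws) idx)
              (pvNextScan (pvZm flat ws) j) (j - idx) d)) j d = _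
          rw [hpp, hnp]
          set pages := pvInferredA prev none (j - idx) d with hpagesdef
          have hplen : pages.length = j - idx := by rw [hpagesdef, pvInferredA_eq, pvInferB_length]
          rw [pvWriteA_pvZm pages flat ws idx hf]
          set ws' := pvVWrite ws idx pages with hws'def
          have hw'len : ws'.length = ws.length := pvVWrite_length pages ws idx
          have hstep := ih ws' j none (by omega) (by rw [hw'len]; exact h1)
            (fun k hk => by
              rw [hws'def, pvVWrite_getD, if_neg (by rw [hplen]; omega)]
              exact h2 k (by omega))
            (fun k hk => by
              rcases Nat.lt_or_ge k idx with hk2 | hk2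
              · rw [hws'def, pvVWrite_getD, if_neg (by omega)]; exact h3 k hk2
              · rw [hws'def, pvVWrite_getD,
                  if_pos ⟨hk2, by rw [hplen]; omega, by omega⟩]; rfl)
            (fun hlt _ => absurd hlt (by rw [hw'len]; omega))
          rw [hstep]
          congr 1
          have hdropj : vs.drop j = [] := List.drop_of_length_le (by omega)
          rw [hdropj, pvGo_nil]
          have hgo1 : pvGo prev (vs.drop idx) d = pvInferB prev (j - idx) none d :=
            pvGo_eq_none_case prev d _ _ hrun
              (by rw [pvGetD_drop, show idx + (j - idx) = j from by omega]
                  exact List.getD_eq_default _ _ (by omega))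
          have htake : ws'.take j = ws.take idx ++ pages.map some :=
            pvVWrite_take ws idx pages j (by omega) hplen hjle
          rw [hgo1, htake, hpagesdef, pvInferredA_eq]
          simp
    · exact pvExit flat d ws idx prev hf (by omega) h1

-- zip of a list with a function of itself is a map
theorem pvZipSelf (l : List (List (String × Option Int)))
    (g : List (String × Option Int) → Option Int) :
    (l.zip (l.map g)).map (fun p => pvIns p.1 p.2) = l.map (fun it => pvIns it (g it)) := by
  induction l with
  | nil => rfl
  | cons x t ih => simp only [List.map_cons, List.zip_cons_cons, ih]

theorem pvFinal (flat : List (List (String × Option Int))) (d : Int) :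
    resolve_fallback_physical_indices flat d = resolve_fallback_physical_indices_alt flat d := by
  unfold resolve_fallback_physical_indices resolve_fallback_physical_indices_alt
  have hinit : flat.map (fun it => pvIns it ((PySem.Dict.mk it).getD "physical_index" none))
      = pvZm flat (flat.map (fun it => (PySem.Dict.mk it).getD "physical_index" none)) := by
    rw [pvZm, pvZipSelf]
  rw [hinit]
  have h := pvMain flat d
    (flat.map (fun it => (PySem.Dict.mk it).getD "physical_index" none)).length
    (flat.map (fun it => (PySem.Dict.mk it).getD "physical_index" none)) 0 none
    (by omega) rfl (fun k _ => rfl) (fun k hk => absurd hk (Nat.not_lt_zero k))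
    (fun _ _ => rfl)
  rw [List.take_zero, List.drop_zero, List.nil_append] at h
  rw [h, pvZm, List.zip_map_right, List.map_map]
  rfl

-- ===== VERDICT (by name: the statement is the Claim_ definition above) =====
theorem resolve_fallback_physical_indices_spec : Claim_equal_resolve_fallback_physical_indices := by
  intro flat_toc_items default_page _ _
  unfold Spec_resolve_fallback_physical_indices
  exact pvFinal flat_toc_items default_page
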